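-- pv_equiv track=rewrite | github.com/mengjihua/Binary-Battle | 二分/二分查找/1385.py | findTheDistanceValue2
-- ===== SOURCE A (Python) =====
-- def findTheDistanceValue2(arr1, arr2, d):
--     arr1.sort()
--     arr2.sort()
--     ans = j = 0
--     for x in arr1:
--         while j < len(arr2) and arr2[j] < x - d:
--             j += 1
--         if j == len(arr2) or arr2[j] > x + d:
--             ans += 1
--     return ans
-- ===== SOURCE B (Python) =====
-- def findTheDistanceValue2(arr1, arr2, d):
--     # the two in-place sorts are kept so that argument mutation matches A
--     arr1.sort()
--     arr2.sort()
--     return sum(all(abs(x - y) > d for y in arr2) for x in arr1)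
-- ===== Notes on version B (the rewrite author's own statement) =====
-- stated objective: idiomatic
-- what changed: Replaces A's sorted two-pointer merge (a stateful shared index advanced across arr2) with the direct definition of the distance value: a one-line count of arr1 elements whose distance to every arr2 element exceeds d; both in-place sorts are kept so argument mutation is identical.
import Mathlib
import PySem

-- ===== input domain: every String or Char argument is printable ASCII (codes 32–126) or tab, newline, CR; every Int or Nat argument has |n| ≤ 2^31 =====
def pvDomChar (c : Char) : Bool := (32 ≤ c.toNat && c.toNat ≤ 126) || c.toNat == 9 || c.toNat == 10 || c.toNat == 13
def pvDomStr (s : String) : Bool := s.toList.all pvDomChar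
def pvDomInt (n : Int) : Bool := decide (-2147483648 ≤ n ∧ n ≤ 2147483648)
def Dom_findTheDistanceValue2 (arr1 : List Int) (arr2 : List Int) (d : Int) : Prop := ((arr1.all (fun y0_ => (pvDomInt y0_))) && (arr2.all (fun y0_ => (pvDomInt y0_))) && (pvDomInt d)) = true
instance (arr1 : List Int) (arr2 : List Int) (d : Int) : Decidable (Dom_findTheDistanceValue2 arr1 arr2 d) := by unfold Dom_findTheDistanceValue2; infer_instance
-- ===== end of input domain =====

-- B replaces A's stateful two-pointer merge with the direct definition: count the arr1
-- elements whose distance to every arr2 element exceeds d (objective: idiomatic); both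
-- versions sort the argument lists in place in Python, so argument mutation is identical.

-- ===== PORT A =====
-- the inner `while j < len(arr2) and arr2[j] < x - d: j += 1`
def pvAwhile (arr2 : List Int) (t : Int) (j : Nat) : Nat :=
  if h : j < arr2.length ∧ arr2.getD j 0 < t then pvAwhile arr2 t (j + 1) else j
termination_by arr2.length - j
decreasing_by omega

def findTheDistanceValue2 (arr1 : List Int) (arr2 : List Int) (d : Int) : Int :=
  let s1 := PySem.List.sorted arr1 (fun x => x) false
  let s2 := PySem.List.sorted arr2 (fun x => x) false
  let r := s1.foldl (fun (st : Int × Nat) x =>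
      let j := pvAwhile s2 (x - d) st.2
      if j = s2.length ∨ s2.getD j 0 > x + d then (st.1 + 1, j) else (st.1, j))
    (0, 0)
  r.1

-- ===== PORT B =====
def findTheDistanceValue2_alt (arr1 : List Int) (arr2 : List Int) (d : Int) : Int :=
  let s1 := PySem.List.sorted arr1 (fun x => x) false
  let s2 := PySem.List.sorted arr2 (fun x => x) false
  -- sum(all(abs(x - y) > d for y in arr2) for x in arr1): a count of the passing elements
  (s1.countP (fun x => s2.all (fun y => decide (d < |x - y|))) : Int)

-- ===== PRECONDITION & SPEC =====
def Spec_findTheDistanceValue2 (arr1 : List Int) (arr2 : List Int) (d : Int) (out : Int) : Prop := out = findTheDistanceValue2_alt arr1 arr2 d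
instance (arr1 : List Int) (arr2 : List Int) (d : Int) (out : Int) : Decidable (Spec_findTheDistanceValue2 arr1 arr2 d out) := by unfold Spec_findTheDistanceValue2; infer_instance

-- ===== CLAIM (what is proved, stated in full; the proofs are below) =====
def Claim_equal_findTheDistanceValue2 : Prop := ∀ (arr1 : List Int) (arr2 : List Int) (d : Int), Dom_findTheDistanceValue2 arr1 arr2 d → Spec_findTheDistanceValue2 arr1 arr2 d (findTheDistanceValue2 arr1 arr2 d)

-- ===== LEMMAS AND PROOFS =====

-- lower-bound index: first position whose element is ≥ t (l.length if none)
def pvLb (l : List Int) (t : Int) : Nat := l.findIdx (fun y => decide (t ≤ y))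

theorem pvLb_le_length (l : List Int) (t : Int) : pvLb l t ≤ l.length :=
  List.findIdx_le_length

theorem pvLt_of_lt_lb (l : List Int) (t : Int) {i : Nat} (hi : i < pvLb l t) :
    l.getD i 0 < t := by
  have hlen : i < l.length := lt_of_lt_of_le hi (pvLb_le_length l t)
  have := List.not_of_lt_findIdx hi
  rw [List.getD_eq_getElem l 0 hlen]
  simpa using this

theorem pvLe_of_lb (l : List Int) (t : Int) (h : pvLb l t < l.length) :
    t ≤ l.getD (pvLb l t) 0 := by
  have := List.findIdx_getElem (w := h)
  rw [List.getD_eq_getElem l 0 h]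
  simpa using this

theorem pvLb_mono (l : List Int) {t t' : Int} (h : t ≤ t') : pvLb l t ≤ pvLb l t' := by
  by_contra hc
  rw [not_le] at hc
  have h1 : l.getD (pvLb l t') 0 < t := pvLt_of_lt_lb l t hc
  have h2 : pvLb l t' < l.length := lt_of_lt_of_le hc (pvLb_le_length l t)
  have h3 : t' ≤ l.getD (pvLb l t') 0 := pvLe_of_lb l t' h2
  linarith

-- sorted: later elements are ≥ earlier ones
theorem pvSorted_getD_mono {l : List Int} (hs : l.Pairwise (· ≤ ·)) {i j : Nat}
    (hij : i ≤ j) (hj : j < l.length) : l.getD i 0 ≤ l.getD j 0 := by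
  rcases Nat.eq_or_lt_of_le hij with rfl | hlt
  · exact le_refl _
  · have hi : i < l.length := lt_trans hlt hj
    rw [List.getD_eq_getElem l 0 hi, List.getD_eq_getElem l 0 hj]
    exact (List.pairwise_iff_getElem.mp hs) i j hi hj hlt

theorem pvAwhile_eq (l : List Int) (t : Int) :
    ∀ k j, l.length - j ≤ k → j ≤ pvLb l t → pvAwhile l t j = pvLb l t := by
  intro k
  induction k with
  | zero =>
    intro j hk hj
    have hjl : l.length ≤ j := by omega
    have : pvLb l t ≤ j := le_trans (pvLb_le_length l t) hjl
    have hje : j = pvLb l t := le_antisymm hj this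
    rw [pvAwhile]
    have hno : ¬ (j < l.length ∧ l.getD j 0 < t) := by
      intro ⟨h1, _⟩; omega
    rw [dif_neg hno]; exact hje
  | succ k ih =>
    intro j hk hj
    rw [pvAwhile]
    split_ifs with h
    · have hjlt : j < pvLb l t := by
        rcases Nat.eq_or_lt_of_le hj with hje | hlt
        · exfalso
          have : t ≤ l.getD j 0 := hje ▸ pvLe_of_lb l t (hje ▸ h.1)
          linarith [h.2]
        · exact hlt
      exact ih (j + 1) (by omega) hjlt
    · rw [not_and_or, not_lt, not_lt] at h
      rcases Nat.eq_or_lt_of_le hj with hje | hlt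
      · exact hje
      · exfalso
        have hjl : j < l.length := lt_of_lt_of_le hlt (pvLb_le_length l t)
        have hv := pvLt_of_lt_lb l t hlt
        rcases h with h | h
        · omega
        · linarith

-- A's per-element test at the lower bound agrees with B's "far from every element" test
theorem pvCond_iff {s2 : List Int} (hs : s2.Pairwise (· ≤ ·)) (x d : Int) :
    (pvLb s2 (x - d) = s2.length ∨ s2.getD (pvLb s2 (x - d)) 0 > x + d) ↔
      s2.all (fun y => decide (d < |x - y|)) = true := by
  constructor
  · intro h
    rw [List.all_eq_true]
    intro y hy
    obtain ⟨i, hi, rfl⟩ := List.mem_iff_getElem.mp hy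
    rw [decide_eq_true_iff]
    by_cases hij : i < pvLb s2 (x - d)
    · have := pvLt_of_lt_lb s2 (x - d) hij
      rw [List.getD_eq_getElem s2 0 hi] at this
      have : d < x - s2[i] := by linarith
      exact lt_of_lt_of_le this (le_trans (le_abs_self _) (le_refl _))
    · rw [not_lt] at hij
      have hlb : pvLb s2 (x - d) < s2.length := lt_of_le_of_lt hij hi
      rcases h with h | h
      · omega
      · have hmono := pvSorted_getD_mono hs hij hi
        rw [List.getD_eq_getElem s2 0 hi] at hmono
        have : d < s2[i] - x := by linarith
        calc d < s2[i] - x := this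
          _ = -(x - s2[i]) := by ring
          _ ≤ |x - s2[i]| := neg_le_abs _
  · intro hall
    by_cases hl : pvLb s2 (x - d) = s2.length
    · exact Or.inl hl
    · right
      have hlb : pvLb s2 (x - d) < s2.length :=
        lt_of_le_of_ne (pvLb_le_length s2 (x - d)) hl
      have hge := pvLe_of_lb s2 (x - d) hlb
      have hmem : s2.getD (pvLb s2 (x - d)) 0 ∈ s2 := by
        rw [List.getD_eq_getElem s2 0 hlb]; exact List.getElem_mem hlb
      have := List.all_eq_true.mp hall _ hmem
      rw [decide_eq_true_iff] at this
      by_contra hc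
      rw [not_lt] at hc
      have habs : |x - s2.getD (pvLb s2 (x - d)) 0| ≤ d :=
        abs_le.mpr ⟨by linarith, by linarith⟩
      linarith

theorem pvFold_count (s2 : List Int) (hs2 : s2.Pairwise (· ≤ ·)) (d : Int) :
    ∀ (s1 : List Int), s1.Pairwise (· ≤ ·) → ∀ (ans : Int) (j : Nat),
      (∀ x ∈ s1, j ≤ pvLb s2 (x - d)) →
      (s1.foldl (fun (st : Int × Nat) x =>
          if pvAwhile s2 (x - d) st.2 = s2.length ∨ s2.getD (pvAwhile s2 (x - d) st.2) 0 > x + d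
          then (st.1 + 1, pvAwhile s2 (x - d) st.2) else (st.1, pvAwhile s2 (x - d) st.2))
        (ans, j)).1
      = ans + (s1.countP (fun x => s2.all (fun y => decide (d < |x - y|))) : Int) := by
  intro s1
  induction s1 with
  | nil => intro _ ans j _; simp
  | cons x xs ih =>
    intro hp ans j hj
    have hpx := List.pairwise_cons.mp hp
    have hjx : j ≤ pvLb s2 (x - d) := hj x (List.mem_cons_self ..)
    have hA : pvAwhile s2 (x - d) j = pvLb s2 (x - d) :=
      pvAwhile_eq s2 (x - d) (s2.length - j) j (le_refl _) hjx
    have hnext : ∀ y ∈ xs, pvLb s2 (x - d) ≤ pvLb s2 (y - d) := by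
      intro y hy
      exact pvLb_mono s2 (by linarith [hpx.1 y hy])
    simp only [List.foldl_cons, hA, List.countP_cons]
    by_cases hcond : pvLb s2 (x - d) = s2.length ∨ s2.getD (pvLb s2 (x - d)) 0 > x + d
    · have hb : s2.all (fun y => decide (d < |x - y|)) = true := (pvCond_iff hs2 x d).mp hcond
      rw [if_pos hcond, ih hpx.2 (ans + 1) _ hnext, hb]
      simp; ring
    · have hb : ¬ s2.all (fun y => decide (d < |x - y|)) = true := fun h => hcond ((pvCond_iff hs2 x d).mpr h)
      rw [if_neg hcond, ih hpx.2 ans _ hnext]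
      rw [Bool.not_eq_true] at hb
      rw [hb]
      simp

-- ===== VERDICT (by name: the statement is the Claim_ definition above) =====
theorem findTheDistanceValue2_spec : Claim_equal_findTheDistanceValue2 := by
  intro arr1 arr2 d _
  unfold Spec_findTheDistanceValue2 findTheDistanceValue2 findTheDistanceValue2_alt
  dsimp only
  have hs1 : (PySem.List.sorted arr1 (fun x => x) false).Pairwise (· ≤ ·) := by
    have := PySem.List.sorted_pairwise (xs := arr1) (key := fun x => x)
    simpa using this
  have hs2 : (PySem.List.sorted arr2 (fun x => x) false).Pairwise (· ≤ ·) := by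
    have := PySem.List.sorted_pairwise (xs := arr2) (key := fun x => x)
    simpa using this
  rw [pvFold_count _ hs2 d _ hs1 0 0 (fun _ _ => Nat.zero_le _)]
  ring
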